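-- pv_equiv track=rewrite | github.com/lyc0603/crypto_jargon | environ/pretrain/mlm_data_gen.py | text_segmentate
-- ===== SOURCE A (Python) =====
-- def text_segmentate(
--     text: str, max_len: int, seps: str = "\n", strips: str | None = None
-- ):
--     """
--     Text segmentation
--     """
--
--     text = text.strip().strip(strips)
--     if seps and len(text) > max_len:
--         pieces = text.split(seps[0])
--         text, texts = "", []
--         for i, p in enumerate(pieces):
--             if text and len(text) + len(p) > max_len - 1:
--                 texts.extend(text_segmentate(text, max_len, seps[1:], strips))
--                 text = ""
--             if i + 1 == len(pieces):
--                 text += p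
--             else:
--                 text = text + p + seps[0]
--
--         if text:
--             texts.extend(text_segmentate(text, max_len, seps[1:], strips))
--         return texts
--     else:
--         return [text]
-- ===== SOURCE B (Python) =====
-- def text_segmentate(
--     text: str, max_len: int, seps: str = "\n", strips: str | None = None
-- ):
--     """Index-based variant: instead of splitting the text into piece strings and
--     concatenating them into a growing buffer, scan the positions of the separator
--     character and cut the text by slicing whenever the next piece would end past
--     start + max_len - 1."""
--     text = text.strip().strip(strips)
--     if not seps or len(text) <= max_len:
--         return [text]
--     sep, rest = seps[0], seps[1:]
--     n = len(text)
--     out = []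
--     start = 0   # start offset of the current segment
--     prev = 0    # start offset of the current piece (just past the last separator)
--     for s in range(n):
--         if text[s] != sep:
--             continue
--         if start < prev and s - start > max_len - 1:
--             out.extend(text_segmentate(text[start:prev], max_len, rest, strips))
--             start = prev
--         prev = s + 1
--     if start < prev and n - start > max_len - 1:
--         out.extend(text_segmentate(text[start:prev], max_len, rest, strips))
--         start = prev
--     if start < n:
--         out.extend(text_segmentate(text[start:], max_len, rest, strips))
--     return out
-- ===== Notes on version B (the rewrite author's own statement) =====
-- stated objective: alternative
-- what changed: A splits the text into piece strings and grows a buffer by string concatenation, flushing it when it gets too long; B never builds a buffer: it scans the separator positions by index, keeps only two integer offsets (segment start and current piece start), cuts with the threshold s - start > max_len - 1 and extracts each segment by slicing the text once.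
import Mathlib
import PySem

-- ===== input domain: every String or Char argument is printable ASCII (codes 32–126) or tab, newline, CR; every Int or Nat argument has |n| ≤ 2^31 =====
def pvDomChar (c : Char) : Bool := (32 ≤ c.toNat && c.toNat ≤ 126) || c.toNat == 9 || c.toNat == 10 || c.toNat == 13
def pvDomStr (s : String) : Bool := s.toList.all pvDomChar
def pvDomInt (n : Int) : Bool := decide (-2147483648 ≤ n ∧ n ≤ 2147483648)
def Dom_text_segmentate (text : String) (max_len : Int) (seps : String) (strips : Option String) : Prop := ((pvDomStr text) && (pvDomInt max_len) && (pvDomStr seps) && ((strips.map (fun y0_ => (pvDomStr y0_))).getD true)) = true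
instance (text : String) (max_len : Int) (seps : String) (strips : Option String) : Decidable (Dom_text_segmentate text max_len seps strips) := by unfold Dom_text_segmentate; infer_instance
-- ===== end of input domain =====

-- B replaces A's split-into-pieces-and-grow-a-buffer loop by a single scan over the
-- positions of the separator character that cuts the text by index arithmetic and
-- slicing (alternative algorithmic mechanism, same asymptotic cost).
-- Both ports work on List Char (PySem.Chars is the exact semantics layer for str).

-- ===== PORT A =====
-- text.strip().strip(strips)  (identical first line of A and of B)
def pvPrepA (strips : Option (List Char)) (t : List Char) : List Char :=
  match strips with
  | none => PySem.Chars.strip (PySem.Chars.strip t)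
  | some cs => PySem.Chars.stripChars (PySem.Chars.strip t) cs

-- A's for-loop over enumerate(pieces): state (text, texts); 'i + 1 == len(pieces)' ↔ rest = []
def pvLoopA (rec : List Char → List (List Char)) (sep : Char) (max_len : Int) :
    List (List Char) → List Char × List (List Char) → List Char × List (List Char)
  | [], st => st
  | p :: rest, (tx, texts) =>
    let st1 := if tx ≠ [] ∧ (tx.length : Int) + (p.length : Int) > max_len - 1
               then (([] : List Char), texts ++ rec tx) else (tx, texts)
    let tx2 := if rest = [] then st1.1 ++ p else st1.1 ++ p ++ [sep]
    pvLoopA rec sep max_len rest (tx2, st1.2)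

def pvSegA (max_len : Int) (strips : Option (List Char)) (seps text : List Char) : List (List Char) :=
  let t := pvPrepA strips text
  match seps with
  | [] => [t]                                        -- 'if seps and …' fails: return [text]
  | c :: rest =>
    if (t.length : Int) > max_len then
      let pieces := PySem.Chars.splitOn t [c]        -- text.split(seps[0])
      let st := pvLoopA (fun u => pvSegA max_len strips rest u) c max_len pieces ([], [])
      if st.1 ≠ [] then st.2 ++ pvSegA max_len strips rest st.1 else st.2
    else [t]
termination_by seps.length
decreasing_by all_goals simp

def text_segmentate (text : String) (max_len : Int) (seps : String) (strips : Option String) : List String :=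
  (pvSegA max_len (strips.map String.toList) seps.toList text.toList).map (fun l => String.ofList l)

-- ===== PORT B =====
-- B's 'for s in range(n): if text[s] != sep: continue; …' scan: structural recursion
-- over the characters of t with the running position s; state (out, start, prev).
-- text[a:b] with 0 ≤ a ≤ b ≤ n is exactly (t.drop a).take (b - a); text[a:] is t.drop a.
def pvScanB (rec : List Char → List (List Char)) (c : Char) (ml : Int) (t : List Char) :
    List Char → Nat → List (List Char) × Nat × Nat → List (List Char) × Nat × Nat
  | [], _, st => st
  | ch :: u, s, (out, start, prev) =>
    if ch ≠ c then pvScanB rec c ml t u (s + 1) (out, start, prev)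
    else
      let st1 := if start < prev ∧ (s : Int) - (start : Int) > ml - 1
                 then (out ++ rec ((t.drop start).take (prev - start)), prev)
                 else (out, start)
      pvScanB rec c ml t u (s + 1) (st1.1, st1.2, s + 1)

def pvSegB (ml : Int) (strips : Option (List Char)) (seps text : List Char) : List (List Char) :=
  let t := pvPrepA strips text
  match seps with
  | [] => [t]                                        -- 'if not seps or …'
  | c :: rest =>
    if (t.length : Int) ≤ ml then [t]
    else
      let st := pvScanB (fun u => pvSegB ml strips rest u) c ml t t 0 ([], 0, 0)
      -- trailing piece: same cut check, then flush whatever segment remains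
      let st2 := if st.2.1 < st.2.2 ∧ (t.length : Int) - (st.2.1 : Int) > ml - 1
                 then (st.1 ++ pvSegB ml strips rest ((t.drop st.2.1).take (st.2.2 - st.2.1)), st.2.2)
                 else (st.1, st.2.1)
      if st2.2 < t.length then st2.1 ++ pvSegB ml strips rest (t.drop st2.2) else st2.1
termination_by seps.length
decreasing_by all_goals simp

def text_segmentate_alt (text : String) (max_len : Int) (seps : String) (strips : Option String) : List String :=
  (pvSegB max_len (strips.map String.toList) seps.toList text.toList).map (fun l => String.ofList l)

-- ===== PRECONDITION & SPEC =====
def Spec_text_segmentate (text : String) (max_len : Int) (seps : String) (strips : Option String) (out : List String) : Prop := out = text_segmentate_alt text max_len seps strips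
instance (text : String) (max_len : Int) (seps : String) (strips : Option String) (out : List String) : Decidable (Spec_text_segmentate text max_len seps strips out) := by unfold Spec_text_segmentate; infer_instance

-- ===== CLAIM (what is proved, stated in full; the proofs are below) =====
def Claim_equal_text_segmentate : Prop := ∀ (text : String) (max_len : Int) (seps : String) (strips : Option String), Dom_text_segmentate text max_len seps strips → Spec_text_segmentate text max_len seps strips (text_segmentate text max_len seps strips)

-- ===== LEMMAS AND PROOFS =====

-- str.split(sep) for a single-character sep, in the structural form the proofs need
def splitC (c : Char) : List Char → List (List Char)
  | [] => [[]]
  | x :: u => if x = c then [] :: splitC c u else (splitC c u).modifyHead (x :: ·)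

lemma splitC_ne_nil (c : Char) : ∀ (u : List Char), splitC c u ≠ []
  | [] => by simp [splitC]
  | x :: u => by
    simp only [splitC]
    split_ifs
    · simp
    · cases h : splitC c u with
      | nil => exact absurd h (splitC_ne_nil c u)
      | cons hd tl => simp [List.modifyHead]

lemma splitOn_go_spec (c : Char) :
    ∀ (fuel : Nat) (l : List Char), l.length < fuel → ∀ (cur : List Char) (acc : List (List Char)),
    PySem.Chars.splitOn.go [c] fuel l cur acc
      = acc.reverse ++ (splitC c l).modifyHead (cur.reverse ++ ·) := by
  intro fuel
  induction fuel with
  | zero => intro l hl; omega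
  | succ f ih =>
    intro l hl cur acc
    cases l with
    | nil => simp [PySem.Chars.splitOn.go, splitC]
    | cons x u =>
      simp only [PySem.Chars.splitOn.go]
      by_cases hx : x = c
      · subst hx
        have hpre : List.isPrefixOf [x] (x :: u) = true := by simp [List.isPrefixOf]
        rw [if_pos hpre]
        simp only [List.length_cons] at hl
        rw [show List.drop ([x].length) (x :: u) = u from by simp]
        rw [ih u (by omega)]
        simp [splitC]
        cases splitC x u <;> simp
      · have hpre : List.isPrefixOf [c] (x :: u) = false := by
          simp [List.isPrefixOf]
          exact fun h => (hx h.symm).elim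
        rw [if_neg (by simp [hpre])]
        simp only [List.length_cons] at hl
        rw [ih u (by omega)]
        have hne := splitC_ne_nil c u
        cases h : splitC c u with
        | nil => exact absurd h hne
        | cons hd tl => simp [splitC, hx, h, List.modifyHead]

lemma splitOn_eq_splitC (c : Char) (t : List Char) :
    PySem.Chars.splitOn t [c] = splitC c t := by
  show PySem.Chars.splitOn.go [c] (t.length + 1) t [] [] = _
  rw [splitOn_go_spec c (t.length + 1) t (by omega)]
  have := splitC_ne_nil c t
  cases h : splitC c t with
  | nil => exact absurd h this
  | cons hd tl => simp [List.modifyHead]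

lemma splitC_of_not_mem (c : Char) (u : List Char) (h : c ∉ u) : splitC c u = [u] := by
  induction u with
  | nil => simp [splitC]
  | cons x v ih =>
    simp only [List.mem_cons, not_or] at h
    simp [splitC, Ne.symm h.1, ih h.2, List.modifyHead]

lemma splitC_append_cons (c : Char) (p u : List Char) (h : c ∉ p) :
    splitC c (p ++ c :: u) = p :: splitC c u := by
  induction p with
  | nil => simp [splitC]
  | cons x q ih =>
    simp only [List.mem_cons, not_or] at h
    simp [splitC, Ne.symm h.1, ih h.2, List.modifyHead]

lemma exists_split_first (c : Char) (u : List Char) (h : c ∈ u) :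
    ∃ p u', u = p ++ c :: u' ∧ c ∉ p := by
  induction u with
  | nil => simp at h
  | cons x v ih =>
    by_cases hx : x = c
    · exact ⟨[], v, by simp [hx], by simp⟩
    · have hv : c ∈ v := by
        rcases List.mem_cons.mp h with h1 | h1
        · exact absurd h1.symm hx
        · exact h1
      obtain ⟨p, u', h1, h2⟩ := ih hv
      refine ⟨x :: p, u', by simp [h1], ?_⟩
      simp only [List.mem_cons, not_or]
      exact ⟨fun he => hx he.symm, h2⟩

-- scanning a separator-free prefix only advances the position
lemma pvScanB_skip (rec : List Char → List (List Char)) (c : Char) (ml : Int) (t : List Char) :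
    ∀ (p : List Char) (v : List Char) (s : Nat) (st : List (List Char) × Nat × Nat),
    c ∉ p → pvScanB rec c ml t (p ++ v) s st = pvScanB rec c ml t v (s + p.length) st := by
  intro p
  induction p with
  | nil => intro v s st _; simp
  | cons x q ih =>
    intro v s st h
    simp only [List.mem_cons, not_or] at h
    obtain ⟨st1, st2⟩ := st
    obtain ⟨st2a, st2b⟩ := st2
    simp only [List.cons_append, pvScanB, if_pos (show x ≠ c from fun he => h.1 he.symm)]
    rw [ih v (s + 1) _ h.2, show s + 1 + q.length = s + (x :: q).length from by
      simp only [List.length_cons]; omega]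

-- the two post-loop finalisations, as named shorthands for the proofs
def pvFinA (rec : List Char → List (List Char)) (st : List Char × List (List Char)) : List (List Char) :=
  if st.1 ≠ [] then st.2 ++ rec st.1 else st.2

def pvFinB (rec : List Char → List (List Char)) (ml : Int) (t : List Char)
    (st : List (List Char) × Nat × Nat) : List (List Char) :=
  let st2 := if st.2.1 < st.2.2 ∧ (t.length : Int) - (st.2.1 : Int) > ml - 1
             then (st.1 ++ rec ((t.drop st.2.1).take (st.2.2 - st.2.1)), st.2.2)
             else (st.1, st.2.1)
  if st2.2 < t.length then st2.1 ++ rec (t.drop st2.2) else st2.1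

lemma pvLoopA_single (rec : List Char → List (List Char)) (c : Char) (ml : Int)
    (p tx : List Char) (out : List (List Char)) :
    pvLoopA rec c ml [p] (tx, out)
      = if tx ≠ [] ∧ (tx.length : Int) + (p.length : Int) > ml - 1
        then (p, out ++ rec tx) else (tx ++ p, out) := by
  conv_lhs => rw [pvLoopA]
  split_ifs <;> simp_all [pvLoopA]

lemma pvLoopA_cons (rec : List Char → List (List Char)) (c : Char) (ml : Int)
    (p q tx : List Char) (Q : List (List Char)) (out : List (List Char)) :
    pvLoopA rec c ml (p :: q :: Q) (tx, out)
      = if tx ≠ [] ∧ (tx.length : Int) + (p.length : Int) > ml - 1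
        then pvLoopA rec c ml (q :: Q) (p ++ [c], out ++ rec tx)
        else pvLoopA rec c ml (q :: Q) (tx ++ p ++ [c], out) := by
  conv_lhs => rw [pvLoopA]
  split_ifs <;> simp_all

lemma pvScanB_sep (rec : List Char → List (List Char)) (c : Char) (ml : Int) (t : List Char)
    (u : List Char) (s : Nat) (out : List (List Char)) (start prev : Nat) :
    pvScanB rec c ml t (c :: u) s (out, start, prev)
      = if start < prev ∧ (s : Int) - (start : Int) > ml - 1
        then pvScanB rec c ml t u (s + 1) (out ++ rec ((t.drop start).take (prev - start)), prev, s + 1)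
        else pvScanB rec c ml t u (s + 1) (out, start, s + 1) := by
  simp only [pvScanB, if_neg (show ¬ (c ≠ c) from by simp)]
  split_ifs <;> simp

lemma slice_split (t : List Char) (a b e : Nat) (hab : a ≤ b) (hbe : b ≤ e) :
    (t.drop a).take (e - a) = (t.drop a).take (b - a) ++ (t.drop b).take (e - b) := by
  have hd : List.drop (b - a) (t.drop a) = t.drop b := by
    rw [List.drop_drop]; congr 1; omega
  rw [show e - a = (b - a) + (e - b) from by omega, List.take_add, hd]

lemma slice_len (t : List Char) (a b : Nat) (hab : a ≤ b) (hb : b ≤ t.length) :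
    ((t.drop a).take (b - a)).length = b - a := by
  simp only [List.length_take, List.length_drop]
  omega

-- the c ∉ u case: the scan only walks to the end, A's loop consumes the single piece
lemma pvMainNoSep (rec : List Char → List (List Char)) (c : Char) (ml : Int) (t : List Char)
    (u : List Char) (start prev : Nat) (out : List (List Char))
    (h0 : start ≤ prev) (h1 : prev ≤ t.length) (h2 : t.drop prev = u) (hc : c ∉ u) :
    pvFinA rec (pvLoopA rec c ml (splitC c u) ((t.drop start).take (prev - start), out))
      = pvFinB rec ml t (pvScanB rec c ml t u prev (out, start, prev)) := by
  have hn : t.length = prev + u.length := by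
    have hlen := congrArg List.length h2
    simp only [List.length_drop] at hlen
    omega
  have hb := slice_len t start prev h0 h1
  have hscan : pvScanB rec c ml t u prev (out, start, prev) = (out, start, prev) := by
    have h := pvScanB_skip rec c ml t u [] prev (out, start, prev) hc
    simpa [pvScanB] using h
  rw [splitC_of_not_mem c u hc, hscan, pvLoopA_single]
  have hne : ((t.drop start).take (prev - start) = []) ↔ prev - start = 0 := by
    rw [← List.length_eq_zero_iff, hb]
  by_cases hcond : start < prev ∧ (t.length : Int) - (start : Int) > ml - 1
  · have hA : (t.drop start).take (prev - start) ≠ [] ∧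
        (((t.drop start).take (prev - start)).length : Int) + (u.length : Int) > ml - 1 := by
      rw [hb]
      refine ⟨fun he => ?_, by omega⟩
      rw [hne] at he; omega
    rw [if_pos hA]
    simp only [pvFinA, pvFinB, if_pos hcond]
    rw [h2]
    by_cases hp : prev < t.length
    · rw [if_pos hp, if_pos (show u ≠ [] from fun he => by
        subst he; simp at hn; omega)]
    · rw [if_neg hp, if_neg (show ¬ u ≠ [] from by
        simp only [ne_eq, not_not, ← List.length_eq_zero_iff]; omega)]
  · have hA : ¬ ((t.drop start).take (prev - start) ≠ [] ∧
        (((t.drop start).take (prev - start)).length : Int) + (u.length : Int) > ml - 1) := by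
      rw [hb]
      rintro ⟨hx, hy⟩
      rw [ne_eq, hne] at hx
      exact hcond ⟨by omega, by omega⟩
    rw [if_neg hA]
    simp only [pvFinA, pvFinB, if_neg hcond]
    have hbu : (t.drop start).take (prev - start) ++ u = t.drop start := by
      have hd : t.drop prev = List.drop (prev - start) (t.drop start) := by
        rw [List.drop_drop]; congr 1; omega
      rw [← h2, hd, List.take_append_drop]
    rw [hbu]
    by_cases hs : start < t.length
    · rw [if_pos hs, if_pos (show t.drop start ≠ [] from by
        simp only [ne_eq, List.drop_eq_nil_iff]; omega)]
    · rw [if_neg hs, if_neg (show ¬ t.drop start ≠ [] from by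
        simp only [ne_eq, not_not, List.drop_eq_nil_iff]; omega)]

lemma pvMain (rec : List Char → List (List Char)) (c : Char) (ml : Int) (t : List Char) :
    ∀ (u : List Char) (start prev : Nat) (out : List (List Char)),
    start ≤ prev → prev ≤ t.length → t.drop prev = u →
    pvFinA rec (pvLoopA rec c ml (splitC c u) ((t.drop start).take (prev - start), out))
      = pvFinB rec ml t (pvScanB rec c ml t u prev (out, start, prev)) := by
  suffices H : ∀ (n : Nat) (u : List Char), u.length ≤ n →
      ∀ (start prev : Nat) (out : List (List Char)),
      start ≤ prev → prev ≤ t.length → t.drop prev = u →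
      pvFinA rec (pvLoopA rec c ml (splitC c u) ((t.drop start).take (prev - start), out))
        = pvFinB rec ml t (pvScanB rec c ml t u prev (out, start, prev)) by
    intro u start prev out h0 h1 h2
    exact H u.length u le_rfl start prev out h0 h1 h2
  intro n
  induction n with
  | zero =>
    intro u hu start prev out h0 h1 h2
    have : u = [] := by
      cases u with
      | nil => rfl
      | cons x v => simp at hu
    subst this
    exact pvMainNoSep rec c ml t [] start prev out h0 h1 h2 (by simp)
  | succ n ih =>
    intro u hu start prev out h0 h1 h2
    by_cases hc : c ∈ u
    · obtain ⟨p, u', hu', hp⟩ := exists_split_first c u hc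
      subst hu'
      have hlen2 : t.length - prev = p.length + 1 + u'.length := by
        have hlen := congrArg List.length h2
        simp only [List.length_drop, List.length_append, List.length_cons] at hlen
        omega
      have hn : prev + p.length + 1 + u'.length = t.length := by omega
      obtain ⟨q, Q, hQ⟩ : ∃ q Q, splitC c u' = q :: Q := by
        cases h : splitC c u' with
        | nil => exact absurd h (splitC_ne_nil c u')
        | cons a b => exact ⟨a, b, rfl⟩
      have hb := slice_len t start prev h0 h1
      have hne : ((t.drop start).take (prev - start) = []) ↔ prev - start = 0 := by
        rw [← List.length_eq_zero_iff, hb]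
      have hpc : (t.drop prev).take (prev + p.length + 1 - prev) = p ++ [c] := by
        rw [h2, show prev + p.length + 1 - prev = p.length + 1 from by omega,
          show p ++ c :: u' = (p ++ [c]) ++ u' from by simp,
          show p.length + 1 = (p ++ [c]).length from by simp]
        exact List.take_left
      have hdrop : t.drop (prev + p.length + 1) = u' := by
        have hd : t.drop (prev + p.length + 1) = List.drop (p.length + 1) (t.drop prev) := by
          rw [List.drop_drop, Nat.add_assoc]
        rw [hd, h2, show p ++ c :: u' = (p ++ [c]) ++ u' from by simp,
          show p.length + 1 = (p ++ [c]).length from by simp]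
        exact List.drop_left
      have hulen : u'.length ≤ n := by
        simp only [List.length_append, List.length_cons] at hu
        omega
      rw [splitC_append_cons c p u' hp, hQ, pvLoopA_cons,
        pvScanB_skip rec c ml t p (c :: u') prev (out, start, prev) hp, pvScanB_sep]
      by_cases hcond : start < prev ∧ ((prev + p.length : Nat) : Int) - (start : Int) > ml - 1
      · have hA : (t.drop start).take (prev - start) ≠ [] ∧
            (((t.drop start).take (prev - start)).length : Int) + (p.length : Int) > ml - 1 := by
          rw [hb]
          refine ⟨fun he => ?_, by push_cast at hcond ⊢; omega⟩
          rw [hne] at he; omega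
        rw [if_pos hA, if_pos hcond]
        have H := ih u' hulen prev (prev + p.length + 1) (out ++ rec ((t.drop start).take (prev - start)))
          (by omega) (by omega) hdrop
        rw [hQ, hpc] at H
        exact H
      · have hA : ¬ ((t.drop start).take (prev - start) ≠ [] ∧
            (((t.drop start).take (prev - start)).length : Int) + (p.length : Int) > ml - 1) := by
          rw [hb]
          rintro ⟨hx, hy⟩
          rw [ne_eq, hne] at hx
          refine hcond ⟨by omega, by push_cast at hy ⊢; omega⟩
        rw [if_neg hA, if_neg hcond]
        have H := ih u' hulen start (prev + p.length + 1) out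
          (by omega) (by omega) hdrop
        rw [hQ] at H
        have hsl : (t.drop start).take (prev + p.length + 1 - start)
            = (t.drop start).take (prev - start) ++ p ++ [c] := by
          rw [slice_split t start prev (prev + p.length + 1) h0 (by omega), hpc,
            List.append_assoc]
        rw [hsl] at H
        exact H
    · exact pvMainNoSep rec c ml t u start prev out h0 h1 h2 hc

lemma pvSeg_eq (ml : Int) (strips : Option (List Char)) (seps text : List Char) :
    pvSegA ml strips seps text = pvSegB ml strips seps text := by
  induction seps generalizing text with
  | nil => simp [pvSegA, pvSegB]
  | cons c rest ih =>
    simp only [pvSegA, pvSegB]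
    by_cases h : (((pvPrepA strips text).length : Int) > ml)
    · rw [if_pos h, if_neg (show ¬ ((pvPrepA strips text).length : Int) ≤ ml from by omega)]
      have hrec : pvSegA ml strips rest = pvSegB ml strips rest := funext fun u => ih u
      simp only [hrec, splitOn_eq_splitC]
      have H := pvMain (fun u => pvSegB ml strips rest u) c ml (pvPrepA strips text)
        (pvPrepA strips text) 0 0 [] le_rfl (Nat.zero_le _) (by simp)
      simp only [Nat.sub_zero, List.drop_zero, List.take_zero] at H
      exact H
    · rw [if_neg h, if_pos (show ((pvPrepA strips text).length : Int) ≤ ml from by omega)]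

-- ===== VERDICT (by name: the statement is the Claim_ definition above) =====
theorem text_segmentate_spec : Claim_equal_text_segmentate := by
  intro text max_len seps strips _
  unfold Spec_text_segmentate text_segmentate text_segmentate_alt
  rw [pvSeg_eq]
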